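-- pv_equiv track=rewrite | github.com/TDE6541/meridian | src/pipeline/segmentation.py | _resolve_segment_type
-- ===== SOURCE A (Python) =====
-- from typing import Iterable, List, Mapping, Optional, Sequence
--
-- _SEGMENT_TYPE_PRIORITY = (
--     "motion_vote",
--     "agenda_item",
--     "department_report",
--     "procedural",
--     "public_comment",
-- )
--
-- def _resolve_segment_type(markers: Iterable[str]) -> Optional[str]:
--     marker_set = set(markers)
--     for segment_type in _SEGMENT_TYPE_PRIORITY:
--         if segment_type in marker_set:
--             return segment_type
--     if marker_set:
--         return sorted(marker_set)[0]
--     return "discussion"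
-- ===== SOURCE B (Python) =====
-- _SEGMENT_TYPE_PRIORITY = (
--     "motion_vote",
--     "agenda_item",
--     "department_report",
--     "procedural",
--     "public_comment",
-- )
--
-- def _resolve_segment_type(markers):
--     marker_set = set(markers)
--     if not marker_set:
--         return "discussion"
--     priority_index = {t: i for i, t in enumerate(_SEGMENT_TYPE_PRIORITY)}
--     n = len(_SEGMENT_TYPE_PRIORITY)
--     return min(marker_set, key=lambda m: (priority_index.get(m, n), m))
-- ===== Notes on version B (the rewrite author's own statement) =====
-- stated objective: alternative
-- what changed: Replaces A's scan over the priority tuple plus a full sort of the marker set by a single min() pass over the marker set with a composite key (priority rank, marker), which selects the highest-priority marker and falls back to the lexicographically smallest one in one traversal without sorting.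
import Mathlib
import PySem

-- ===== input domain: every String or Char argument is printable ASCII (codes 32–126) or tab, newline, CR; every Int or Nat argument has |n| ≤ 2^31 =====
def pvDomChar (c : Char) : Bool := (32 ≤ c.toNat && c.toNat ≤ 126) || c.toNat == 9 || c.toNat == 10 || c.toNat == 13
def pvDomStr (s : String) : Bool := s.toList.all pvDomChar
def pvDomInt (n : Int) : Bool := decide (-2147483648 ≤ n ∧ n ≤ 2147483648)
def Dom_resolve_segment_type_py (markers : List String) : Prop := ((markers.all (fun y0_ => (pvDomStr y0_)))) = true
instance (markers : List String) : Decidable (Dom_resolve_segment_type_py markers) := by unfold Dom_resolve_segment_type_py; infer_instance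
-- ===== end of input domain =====

-- B replaces A's priority-tuple scan plus full sort of the marker set by one min() pass with a
-- composite (priority rank, marker) key; equal output on every input, no sorting. (objective: alternative)

-- ===== PORT A =====
-- module constant _SEGMENT_TYPE_PRIORITY (shared by both Pythons)
def pvSegPriority : List String :=
  ["motion_vote", "agenda_item", "department_report", "procedural", "public_comment"]

def resolve_segment_type_py (markers : List String) : Option String :=
  let marker_set := PySem.Set.ofList markers
  match pvSegPriority.find? (fun t => marker_set.contains t) with
  | some t => some t
  | none =>
    if marker_set ≠ [] then
      PySem.List.pyGet? (PySem.List.sorted marker_set (fun x => x) false) 0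
    else some "discussion"

-- ===== PORT B =====
-- priority_index = {t: i for i, t in enumerate(_SEGMENT_TYPE_PRIORITY)}
def pvPriorityIndex : PySem.Dict String Int :=
  (PySem.List.enumerate pvSegPriority 0).foldl (fun d p => d.insert p.2 p.1) PySem.Dict.empty

def resolve_segment_type_py_alt (markers : List String) : Option String :=
  let marker_set := PySem.Set.ofList markers
  if marker_set = [] then some "discussion"
  else
    PySem.List.min2? marker_set
      (fun m => pvPriorityIndex.getD m ((pvSegPriority.length : Int))) (fun m => m)

-- ===== PRECONDITION & SPEC =====
def Spec_resolve_segment_type_py (markers : List String) (out : Option String) : Prop := out = resolve_segment_type_py_alt markers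
instance (markers : List String) (out : Option String) : Decidable (Spec_resolve_segment_type_py markers out) := by unfold Spec_resolve_segment_type_py; infer_instance

-- ===== CLAIM (what is proved, stated in full; the proofs are below) =====
def Claim_equal_resolve_segment_type_py : Prop := ∀ (markers : List String), Dom_resolve_segment_type_py markers → Spec_resolve_segment_type_py markers (resolve_segment_type_py markers)

-- ===== LEMMAS AND PROOFS =====

lemma pvPriorityIndex_eq : pvPriorityIndex =
    { items := [("motion_vote", 0), ("agenda_item", 1), ("department_report", 2),
                ("procedural", 3), ("public_comment", 4)] } := by
  decide

-- the composite key's first component, evaluated: rank in the priority list, 5 if absent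
lemma pvK1_eval (y : String) :
    pvPriorityIndex.getD y ((pvSegPriority.length : Int)) =
      if y = "motion_vote" then 0 else if y = "agenda_item" then 1
      else if y = "department_report" then 2 else if y = "procedural" then 3
      else if y = "public_comment" then 4 else 5 := by
  rw [pvPriorityIndex_eq]
  simp only [PySem.Dict.getD, PySem.Dict.get?, List.find?, pvSegPriority]
  split_ifs with h1 h2 h3 h4 h5 <;>
    simp_all [show ∀ a b : String, (a == b) = decide (a = b) from fun a b => by
        by_cases h : a = b <;> simp [h],
      eq_comm]

-- the fold step of min2? with the identity second key
def pvMinStep (k1 : String → Int) (acc : Option String) (x : String) : Option String :=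
  match acc with
  | none => some x
  | some m =>
    if (decide (k1 x < k1 m) || (!decide (k1 m < k1 x) && decide (x < m))) = true
    then some x else some m

lemma pvMin2?_eq_foldl (xs : List String) (k1 : String → Int) :
    PySem.List.min2? xs k1 (fun m => m) = xs.foldl (pvMinStep k1) none := by
  simp only [PySem.List.min2?]
  congr 1
  funext acc x
  cases acc with
  | none => rfl
  | some m =>
    by_cases h1 : k1 x < k1 m <;> by_cases h2 : k1 m < k1 x <;> by_cases h3 : x < m <;>
      simp [pvMinStep, h1, h2, h3]

-- min2?'s fold returns t when t beats every other element strictly in the (k1, id) lex order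
lemma pvMinFold (k1 : String → Int) (t : String) :
    ∀ (xs : List String) (acc : Option String),
      (∀ y ∈ xs, y ≠ t → k1 t < k1 y ∨ (k1 t = k1 y ∧ t < y)) →
      (t ∈ xs ∨ acc = some t) →
      (∀ m, acc = some m → m = t ∨ k1 t < k1 m ∨ (k1 t = k1 m ∧ t < m)) →
      List.foldl (pvMinStep k1) acc xs = some t := by
  intro xs
  induction xs with
  | nil =>
    intro acc _ hmem hinv
    rcases hmem with h | h
    · simp at h
    · simpa using h
  | cons x xs ih =>
    intro acc hmin hmem hinv
    simp only [List.foldl_cons]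
    have hminx : x ≠ t → k1 t < k1 x ∨ (k1 t = k1 x ∧ t < x) :=
      fun hx => hmin x List.mem_cons_self hx
    have hmin' : ∀ y ∈ xs, y ≠ t → k1 t < k1 y ∨ (k1 t = k1 y ∧ t < y) :=
      fun y hy => hmin y (List.mem_cons_of_mem _ hy)
    have htxs : x ≠ t → (t ∈ x :: xs) → t ∈ xs := by
      intro hx h
      rcases List.mem_cons.mp h with h' | h'
      · exact absurd h'.symm hx
      · exact h'
    cases acc with
    | none =>
      by_cases hx : x = t
      · exact ih (some x) hmin' (Or.inr (congrArg some hx))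
          (fun m hm => Or.inl (by injection hm with h; rw [← h, hx]))
      · have hL := hminx hx
        have ht : t ∈ xs := by
          rcases hmem with h | h
          · exact htxs hx h
          · simp at h
        refine ih (some x) hmin' (Or.inl ht) ?_
        intro m hm
        injection hm with hm; subst hm
        exact Or.inr hL
    | some m =>
      by_cases hc : (decide (k1 x < k1 m) || (!decide (k1 m < k1 x) && decide (x < m))) = true
      · -- step takes x
        simp only [pvMinStep, hc, if_true]
        by_cases hx : x = t
        · exact ih (some x) hmin' (Or.inr (congrArg some hx))
            (fun m' hm' => Or.inl (by injection hm' with h; rw [← h, hx]))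
        · have hL := hminx hx
          rcases hinv m rfl with hm | hLm
          · -- m = t and x ≠ t: the step cannot take x
            exfalso
            rcases hL with h | ⟨he, hlt⟩
            · simp [hm, not_lt_of_gt h, h] at hc
            · simp [hm, he, asymm hlt] at hc
          · have hmt : m ≠ t := by
              intro h; subst h
              rcases hLm with h | ⟨_, h⟩ <;> exact absurd h (by simp)
            have ht : t ∈ xs := by
              rcases hmem with h | h
              · exact htxs hx h
              · exact absurd (Option.some.inj h) hmt
            refine ih (some x) hmin' (Or.inl ht) ?_
            intro m' hm'; injection hm' with hm'; subst hm'
            exact Or.inr hL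
      · -- step keeps m
        simp only [pvMinStep, hc]
        rcases hinv m rfl with hm | hLm
        · exact ih (some m) hmin' (Or.inr (congrArg some hm))
            (fun m' hm' => Or.inl (by injection hm' with h; rw [← h, hm]))
        · have hmt : m ≠ t := by
            intro h; subst h
            rcases hLm with h | ⟨_, h⟩ <;> exact absurd h (by simp)
          by_cases hx : x = t
          · -- x = t and t strictly below m: the step must take x
            exfalso
            apply hc
            rcases hLm with h | ⟨he, hlt⟩
            · simp [← hx] at h ⊢; simp [h]
            · rw [← hx] at he hlt; simp [he, hlt]
          · have ht : t ∈ xs := by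
              rcases hmem with h | h
              · exact htxs hx h
              · exact absurd (Option.some.inj h) hmt
            refine ih (some m) hmin' (Or.inl ht) ?_
            intro m' hm'; injection hm' with hm'; subst hm'
            exact Or.inr hLm

lemma pvMin2Eq (xs : List String) (k1 : String → Int) (t : String)
    (ht : t ∈ xs)
    (hmin : ∀ y ∈ xs, y ≠ t → k1 t < k1 y ∨ (k1 t = k1 y ∧ t < y)) :
    PySem.List.min2? xs k1 (fun m => m) = some t := by
  rw [pvMin2?_eq_foldl]
  exact pvMinFold k1 t xs none hmin (Or.inl ht) (by intro m hm; cases hm)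

-- k1 of an element of a set containing none of the five priority strings is 5
lemma pvK1_absent (markers : List String) (y : String)
    (h1 : "motion_vote" ∉ markers) (h2 : "agenda_item" ∉ markers)
    (h3 : "department_report" ∉ markers) (h4 : "procedural" ∉ markers)
    (h5 : "public_comment" ∉ markers) (hy : y ∈ markers) :
    pvPriorityIndex.getD y ((pvSegPriority.length : Int)) = 5 := by
  rw [pvK1_eval]
  split_ifs <;> simp_all

theorem resolve_segment_type_py_spec : Claim_equal_resolve_segment_type_py := by
  intro markers _
  unfold Spec_resolve_segment_type_py
  by_cases hS0 : PySem.Set.ofList markers = []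
  · simp [resolve_segment_type_py, resolve_segment_type_py_alt, hS0, pvSegPriority, List.find?]
  · have hBmin : ∀ t : String, t ∈ markers →
        (∀ y ∈ PySem.Set.ofList markers, y ≠ t →
          pvPriorityIndex.getD t ((pvSegPriority.length : Int)) <
              pvPriorityIndex.getD y ((pvSegPriority.length : Int)) ∨
            (pvPriorityIndex.getD t ((pvSegPriority.length : Int)) =
              pvPriorityIndex.getD y ((pvSegPriority.length : Int)) ∧ t < y)) →
        resolve_segment_type_py_alt markers = some t := by
      intro t htm hmin
      unfold resolve_segment_type_py_alt
      simp only []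
      rw [if_neg hS0]
      exact pvMin2Eq _ _ _ ((PySem.Set.mem_ofList markers t).mpr htm) hmin
    by_cases h1 : "motion_vote" ∈ markers
    · rw [hBmin "motion_vote" h1 ?min]
      · simp [resolve_segment_type_py, pvSegPriority, h1]
      case min =>
        clear hBmin
        intro y hy hne
        have hy' : y ∈ markers := (PySem.Set.mem_ofList markers y).mp hy
        rw [pvK1_eval, pvK1_eval]
        split_ifs <;> simp_all
    · by_cases h2 : "agenda_item" ∈ markers
      · rw [hBmin "agenda_item" h2 ?min]
        · simp [resolve_segment_type_py, pvSegPriority, List.find?, h1, h2]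
        case min =>
          clear hBmin
          intro y hy hne
          have hy' : y ∈ markers := (PySem.Set.mem_ofList markers y).mp hy
          rw [pvK1_eval, pvK1_eval]
          split_ifs <;> simp_all
      · by_cases h3 : "department_report" ∈ markers
        · rw [hBmin "department_report" h3 ?min]
          · simp [resolve_segment_type_py, pvSegPriority, List.find?, h1, h2, h3]
          case min =>
            clear hBmin
            intro y hy hne
            have hy' : y ∈ markers := (PySem.Set.mem_ofList markers y).mp hy
            rw [pvK1_eval, pvK1_eval]
            split_ifs <;> simp_all
        · by_cases h4 : "procedural" ∈ markers
          · rw [hBmin "procedural" h4 ?min]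
            · simp [resolve_segment_type_py, pvSegPriority, List.find?, h1, h2, h3, h4]
            case min =>
              clear hBmin
              intro y hy hne
              have hy' : y ∈ markers := (PySem.Set.mem_ofList markers y).mp hy
              rw [pvK1_eval, pvK1_eval]
              split_ifs <;> simp_all
          · by_cases h5 : "public_comment" ∈ markers
            · rw [hBmin "public_comment" h5 ?min]
              · simp [resolve_segment_type_py, pvSegPriority, List.find?, h1, h2, h3, h4, h5]
              case min =>
                clear hBmin
                intro y hy hne
                have hy' : y ∈ markers := (PySem.Set.mem_ofList markers y).mp hy
                rw [pvK1_eval, pvK1_eval]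
                split_ifs <;> simp_all
            · -- no priority marker present: A takes the head of the sorted set,
              -- B the (unique) lexicographic minimum
              have hsne : PySem.List.sorted (PySem.Set.ofList markers) (fun x => x) false ≠ [] := by
                intro h
                exact hS0 ((PySem.List.sorted_eq_nil_iff _ _ _).mp h)
              rcases e : PySem.List.sorted (PySem.Set.ofList markers) (fun x => x) false with
                _ | ⟨hd, tl⟩
              · exact absurd e hsne
              · have hperm := PySem.List.sorted_perm (PySem.Set.ofList markers) (fun x : String => x) false
                rw [e] at hperm
                have hhd : hd ∈ PySem.Set.ofList markers := hperm.mem_iff.mp List.mem_cons_self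
                have hhd' : hd ∈ markers := (PySem.Set.mem_ofList markers hd).mp hhd
                have hpw := PySem.List.sorted_ofList_pairwise_lt markers
                rw [e, List.pairwise_cons] at hpw
                rw [hBmin hd hhd' ?min]
                · simp [resolve_segment_type_py, pvSegPriority, List.find?, h1, h2, h3, h4, h5,
                    hS0, e, PySem.List.pyGet?, PySem.List.pyIdx?]
                case min =>
                  intro y hy hne
                  have hy' : y ∈ markers := (PySem.Set.mem_ofList markers y).mp hy
                  have hytl : y ∈ tl := by
                    rcases List.mem_cons.mp (hperm.mem_iff.mpr hy) with h | h
                    · exact absurd h hne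
                    · exact h
                  right
                  refine ⟨?_, hpw.1 y hytl⟩
                  rw [pvK1_absent markers hd h1 h2 h3 h4 h5 hhd',
                      pvK1_absent markers y h1 h2 h3 h4 h5 hy']
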